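-- pv_equiv track=rewrite | github.com/odys-z/hello | hellopy/test/leetcode/string/A2019_9_max_vowel.py | maxVowel
-- ===== SOURCE A (Python) =====
-- from heapq import heapify, heappush, heappop
--
-- def maxVowel(S):
--     cntingVowel = 0
--     startix = -1
--     h = list()
--     N = len(S)
--     S += 'x'
--     heapify(h)
--     for ix, c in enumerate(S): # keep counting
--         if c in {'a', 'e', 'i', 'o', 'u'}:
--             cntingVowel += 1
--             if startix < 0:
--                 startix = ix
--         else: # exit
--             if startix >= 0:
--                 # maxLen = cntingVowel
--                 heappush(h, (-cntingVowel, startix))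
--                 startix = -1
--                 cntingVowel = 0
--     # return maxLen
--     maxLen, maxStart = heappop(h)
--     nextLen, nextStart = heappop(h)
--
--     maxLen = -maxLen
--     nextLen = -nextLen
--     if maxStart == 0 or (
--         maxLen + maxStart == N
--         or nextLen + nextStart == N) :
--         return nextLen + maxLen
--     else:
--         return maxLen
-- ===== SOURCE B (Python) =====
-- def maxVowel(S):
--     # Single forward pass with index jumps: an inner while measures each maximal
--     # vowel run in place, and a two-slot accumulator keeps the two best runs by
--     # the key (-length, start) -- no heap, no list of runs, no sort.
--     N = len(S)
--     best = None
--     second = None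
--     i = 0
--     while i < N:
--         if S[i] in 'aeiou':
--             j = i
--             while j < N and S[j] in 'aeiou':
--                 j += 1
--             k = (i - j, i)  # (-run_length, start)
--             if best is None or k < best:
--                 best, second = k, best
--             elif second is None or k < second:
--                 second = k
--             i = j
--         else:
--             i += 1
--     negMax, maxStart = best
--     negNext, nextStart = second
--     maxLen = -negMax
--     nextLen = -negNext
--     if maxStart == 0 or maxLen + maxStart == N or nextLen + nextStart == N:
--         return maxLen + nextLen
--     return maxLen
-- ===== Notes on version B (the rewrite author's own statement) =====
-- stated objective: alternative
-- what changed: A is a char-by-char state machine (counter + start index) that pushes every finished vowel run onto a heap and pops the top two at the end; B walks the string with index jumps (an inner while measures each maximal run in place) and keeps only the two best runs by (-length, start) in two scalar variables, so no heap, no run list and no sort exist; the final boundary formula is unchanged.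
import Mathlib
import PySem

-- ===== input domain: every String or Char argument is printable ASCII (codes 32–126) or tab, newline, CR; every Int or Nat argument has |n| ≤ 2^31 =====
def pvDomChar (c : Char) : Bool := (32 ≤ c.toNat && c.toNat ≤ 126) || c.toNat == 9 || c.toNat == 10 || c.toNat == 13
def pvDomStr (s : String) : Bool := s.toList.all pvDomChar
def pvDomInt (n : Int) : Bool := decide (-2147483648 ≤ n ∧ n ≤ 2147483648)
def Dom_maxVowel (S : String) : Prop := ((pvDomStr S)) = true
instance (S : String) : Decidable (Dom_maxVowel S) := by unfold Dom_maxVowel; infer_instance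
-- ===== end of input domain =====

-- B replaces A's char-by-char state machine + heap of all runs by a single forward
-- pass with index jumps (an inner loop measures each run) keeping only the two best
-- runs in two variables (objective: alternative; same boundary formula).

-- ===== PORT A =====
-- c in {'a','e','i','o','u'}
def pvIsVowel (c : Char) : Bool := c == 'a' || c == 'e' || c == 'i' || c == 'o' || c == 'u'

-- Python tuple '<' on (int, int) is lexicographic = the order of Int ×ₗ Int
def pvLt (a b : Int × Int) : Bool := decide (toLex a < toLex b)

-- heapq modeled as a list kept sorted by Python's tuple order: heappush inserts in
-- order, heappop removes the head (= the smallest element, exactly heappop's value).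
def pvHeapPush (h : List (Int × Int)) (x : Int × Int) : List (Int × Int) :=
  PySem.List.insertBy pvLt x h

-- the body of A's 'for ix, c in enumerate(S)' loop; state = (cntingVowel, startix, h)
def pvAstep (st : Int × Int × List (Int × Int)) (ic : Int × Char) :
    Int × Int × List (Int × Int) :=
  match st, ic with
  | (cnt, start, h), (ix, c) =>
    if pvIsVowel c then
      (cnt + 1, (if start < 0 then ix else start), h)
    else
      if start ≥ 0 then (0, -1, pvHeapPush h (-cnt, start)) else (cnt, start, h)

def maxVowel (S : String) : Int :=
  let N : Int := PySem.Str.len S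
  let S' : List Char := S.toList ++ ['x']          -- S += 'x'
  let st := (PySem.List.enumerate S').foldl pvAstep (0, -1, [])
  -- maxLen, maxStart = heappop(h); nextLen, nextStart = heappop(h)
  match st.2.2 with
  | [] => 0                                        -- first heappop raises IndexError (outside Pre_)
  | [_] => 0                                       -- second heappop raises IndexError (outside Pre_)
  | (negMax, maxStart) :: (negNext, nextStart) :: _ =>
    let maxLen := -negMax
    let nextLen := -negNext
    if maxStart = 0 ∨ maxLen + maxStart = N ∨ nextLen + nextStart = N then
      nextLen + maxLen
    else
      maxLen

-- ===== PORT B =====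
-- 'best is None or k < best' (and the same test for second)
def pvBetter (k : Int × Int) (b : Option (Int × Int)) : Bool :=
  match b with
  | none => true
  | some b => pvLt k b

-- inner 'while j < N and S[j] in "aeiou": j += 1' (S[j] always in range here)
def pvInner (cs : List Char) (N j : Nat) : Nat :=
  if h : j < N ∧ pvIsVowel (cs.getD j ' ') then pvInner cs N (j + 1) else j
  termination_by N - j
  decreasing_by omega

theorem pvInner_ge (cs : List Char) (N : Nat) : ∀ j, j ≤ pvInner cs N j := by
  intro j
  induction j using pvInner.induct cs N with
  | case1 j h ih => rw [pvInner, dif_pos h]; omega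
  | case2 j h => rw [pvInner, dif_neg h]

-- outer 'while i < N' loop; state = (best, second)
def pvOuter (cs : List Char) (N i : Nat)
    (best second : Option (Int × Int)) : Option (Int × Int) × Option (Int × Int) :=
  if hi : i < N then
    if pvIsVowel (cs.getD i ' ') then
      let j := pvInner cs N (i + 1)                 -- the inner while, started at j = i
      let k : Int × Int := ((i : Int) - (j : Int), (i : Int))
      if pvBetter k best then pvOuter cs N j (some k) best
      else if pvBetter k second then pvOuter cs N j best (some k)
      else pvOuter cs N j best second
    else
      pvOuter cs N (i + 1) best second
  else
    (best, second)
  termination_by N - i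
  decreasing_by
    · have := pvInner_ge cs N (i + 1); omega
    · have := pvInner_ge cs N (i + 1); omega
    · have := pvInner_ge cs N (i + 1); omega
    · omega

def maxVowel_alt (S : String) : Int :=
  let N : Int := PySem.Str.len S
  let cs : List Char := S.toList
  match pvOuter cs cs.length 0 none none with
  | (some (negMax, maxStart), some (negNext, nextStart)) =>
    let maxLen := -negMax
    let nextLen := -negNext
    if maxStart = 0 ∨ maxLen + maxStart = N ∨ nextLen + nextStart = N then
      maxLen + nextLen
    else
      maxLen
  | _ => 0                                         -- unpacking None raises (outside Pre_)

-- ===== PRECONDITION & SPEC =====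
-- Pre_ excludes the inputs with fewer than two maximal vowel runs, on which A's
-- second (or first) heappop raises IndexError (and B's unpacking of None raises too).
def Pre_maxVowel (S : String) : Prop :=
  2 ≤ (List.range S.toList.length).countP (fun i =>
        pvIsVowel (S.toList.getD i ' ') &&
        (decide (i = 0) || !pvIsVowel (S.toList.getD (i - 1) ' ')))
instance (S : String) : Decidable (Pre_maxVowel S) := by unfold Pre_maxVowel; infer_instance

def pvWitness_maxVowel : String := "aebeo"

def Spec_maxVowel (S : String) (out : Int) : Prop := out = maxVowel_alt S
instance (S : String) (out : Int) : Decidable (Spec_maxVowel S out) := by unfold Spec_maxVowel; infer_instance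

-- ===== CLAIM (what is proved, stated in full; the proofs are below) =====
def Claim_equal_maxVowel : Prop := ∀ (S : String), Dom_maxVowel S → Pre_maxVowel S → Spec_maxVowel S (maxVowel S)

-- ===== LEMMAS AND PROOFS =====

-- spec recursion: pvBgo l i = (length of the leading vowel run of l, the (-len, start)
-- pairs of the later runs in decreasing-start order), positions counted from i
def pvBgo : List Char → Int → Int × List (Int × Int)
  | [], _ => (0, [])
  | c :: cs, i =>
    let p := pvBgo cs (i + 1)
    if pvIsVowel c then (p.1 + 1, p.2)
    else (0, if p.1 > 0 then p.2 ++ [(-p.1, i + 1)] else p.2)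

def pvRuns (l : List Char) (i : Int) : List (Int × Int) :=
  let p := pvBgo l i
  if p.1 > 0 then p.2 ++ [(-p.1, i)] else p.2

-- the sequence of runs A's loop pushes (leftmost first), starting from loop state (cnt, start)
def pvFlush (l : List Char) (i cnt start : Int) : List (Int × Int) :=
  if start < 0 then (pvRuns l i).reverse
  else (-(cnt + (pvBgo l i).1), start) :: ((pvBgo l i).2).reverse

-- B's two-slot update as a fold step; (best, second) after each considered run
def pvTop2 (st : Option (Int × Int) × Option (Int × Int)) (k : Int × Int) :
    Option (Int × Int) × Option (Int × Int) :=
  if pvBetter k st.1 then (some k, st.1)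
  else if pvBetter k st.2 then (st.1, some k)
  else st

-- the first two elements of a list, as B's option pair
def pvFirst2 (l : List (Int × Int)) : Option (Int × Int) × Option (Int × Int) :=
  (l.head?, l.tail.head?)

theorem pvBgo_cons (c : Char) (cs : List Char) (i : Int) :
    pvBgo (c :: cs) i =
      if pvIsVowel c then ((pvBgo cs (i + 1)).1 + 1, (pvBgo cs (i + 1)).2)
      else (0, if (pvBgo cs (i + 1)).1 > 0 then
                  (pvBgo cs (i + 1)).2 ++ [(-(pvBgo cs (i + 1)).1, i + 1)]
                else (pvBgo cs (i + 1)).2) := rfl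

theorem pvBgo_run_nonneg (l : List Char) : ∀ (i : Int), 0 ≤ (pvBgo l i).1 := by
  induction l with
  | nil => intro i; simp [pvBgo]
  | cons c cs ih =>
    intro i
    rw [pvBgo_cons]
    have h := ih (i + 1)
    split_ifs
    all_goals dsimp only
    all_goals omega

-- A's loop pushes exactly pvFlush, leftmost run first
theorem pv_genA (l : List Char) : ∀ (i cnt start : Int) (h : List (Int × Int)),
    0 ≤ i → (start < 0 → cnt = 0) →
    ((PySem.List.enumerate (l ++ ['x']) i).foldl pvAstep (cnt, start, h)).2.2
      = List.foldl (fun acc x => pvHeapPush acc x) h (pvFlush l i cnt start) := by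
  induction l with
  | nil =>
    intro i cnt start h hi hsc
    by_cases hs : start < 0
    · simp [PySem.List.enumerate_cons, PySem.List.enumerate_nil, pvAstep, pvIsVowel,
        pvFlush, pvRuns, pvBgo, hs, not_le.mpr hs]
    · simp [PySem.List.enumerate_cons, PySem.List.enumerate_nil, pvAstep, pvIsVowel,
        pvFlush, pvBgo, hs, not_lt.mp hs, pvHeapPush]
  | cons c l' ih =>
    intro i cnt start h hi hsc
    rw [List.cons_append, PySem.List.enumerate_cons, List.foldl_cons]
    have hrn : 0 ≤ (pvBgo l' (i + 1)).1 := pvBgo_run_nonneg l' (i + 1)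
    rcases hE : pvBgo l' (i + 1) with ⟨r, rs⟩
    rw [hE] at hrn
    simp only at hrn
    by_cases hv : pvIsVowel c
    · by_cases hs : start < 0
      · have hc0 : cnt = 0 := hsc hs
        have step : pvAstep (cnt, start, h) (i, c) = (cnt + 1, i, h) := by
          simp [pvAstep, hv, hs]
        rw [step, ih (i + 1) (cnt + 1) i h (by omega) (by omega)]
        have e1 : pvFlush l' (i + 1) (cnt + 1) i = (-(cnt + 1 + r), i) :: rs.reverse := by
          simp [pvFlush, hE, not_lt.mpr hi]
        have e2 : pvFlush (c :: l') i cnt start = (-(r + 1), i) :: rs.reverse := by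
          simp only [pvFlush, if_pos hs, pvRuns, pvBgo_cons, if_pos hv, hE]
          simp only [if_pos (by omega : r + 1 > 0), List.reverse_append]
          rfl
        rw [e1, e2]
        congr 3
        omega
      · have step : pvAstep (cnt, start, h) (i, c) = (cnt + 1, start, h) := by
          simp [pvAstep, hv, hs]
        rw [step, ih (i + 1) (cnt + 1) start h (by omega) (by omega)]
        have e1 : pvFlush l' (i + 1) (cnt + 1) start = (-(cnt + 1 + r), start) :: rs.reverse := by
          simp [pvFlush, hE, if_neg hs]
        have e2 : pvFlush (c :: l') i cnt start = (-(cnt + (r + 1)), start) :: rs.reverse := by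
          simp [pvFlush, pvBgo_cons, if_pos hv, hE, if_neg hs]
        rw [e1, e2]
        congr 3
        omega
    · have erun : pvRuns (c :: l') i = if r > 0 then rs ++ [(-r, i + 1)] else rs := by
        simp only [pvRuns, pvBgo_cons, if_neg hv, hE]
        simp
      by_cases hs : start < 0
      · have step : pvAstep (cnt, start, h) (i, c) = (cnt, start, h) := by
          simp [pvAstep, hv, not_le.mpr hs]
        rw [step, ih (i + 1) cnt start h (by omega) hsc]
        have e1 : pvFlush l' (i + 1) cnt start = (pvRuns l' (i + 1)).reverse := by
          simp [pvFlush, if_pos hs]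
        have e2 : pvFlush (c :: l') i cnt start = (pvRuns l' (i + 1)).reverse := by
          rw [pvFlush, if_pos hs, erun]
          simp [pvRuns, hE]
        rw [e1, e2]
      · have step : pvAstep (cnt, start, h) (i, c) = (0, -1, pvHeapPush h (-cnt, start)) := by
          simp [pvAstep, hv, not_lt.mp hs]
        rw [step, ih (i + 1) 0 (-1) (pvHeapPush h (-cnt, start)) (by omega) (by omega)]
        have e1 : pvFlush l' (i + 1) 0 (-1) = (pvRuns l' (i + 1)).reverse := by
          simp [pvFlush]
        have e2 : pvFlush (c :: l') i cnt start
            = (-cnt, start) :: (pvRuns l' (i + 1)).reverse := by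
          rw [pvFlush, if_neg hs]
          simp only [pvBgo_cons, if_neg hv, hE]
          simp [pvRuns, hE]
        rw [e1, e2, List.foldl_cons]

theorem pvInner_le (cs : List Char) (N : Nat) : ∀ j, j ≤ N → pvInner cs N j ≤ N := by
  intro j
  induction j using pvInner.induct cs N with
  | case1 j h ih => intro _; rw [pvInner, dif_pos h]; exact ih (by omega)
  | case2 j h => intro hj; rw [pvInner, dif_neg h]; exact hj

-- the inner while from a vowel position measures exactly the leading run of the suffix
theorem pvInner_bgo (cs : List Char) : ∀ j, j ≤ cs.length →
    pvBgo (cs.drop j) (j : Int)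
      = ((pvInner cs cs.length j : Int) - (j : Int),
         pvRuns (cs.drop (pvInner cs cs.length j)) ((pvInner cs cs.length j : Int))) := by
  intro j
  induction j using pvInner.induct cs cs.length with
  | case1 j h ih =>
    intro hj
    obtain ⟨hlt, hv⟩ := h
    have hdrop : cs.drop j = cs[j] :: cs.drop (j + 1) := List.drop_eq_getElem_cons hlt
    have hgd : cs.getD j ' ' = cs[j] := by simp [List.getD_eq_getElem?_getD, hlt]
    rw [pvInner, dif_pos ⟨hlt, hv⟩]
    rw [hdrop, pvBgo_cons, if_pos (hgd ▸ hv)]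
    have hrec := ih (by omega)
    have : ((j : Int) + 1) = ((j + 1 : Nat) : Int) := by push_cast; ring
    rw [this, hrec]
    rw [Prod.ext_iff]
    exact ⟨by dsimp only; push_cast; ring, rfl⟩
  | case2 j h =>
    intro hj
    rw [pvInner, dif_neg h]
    by_cases hlt : j < cs.length
    · have hv : ¬ pvIsVowel (cs.getD j ' ') = true := by tauto
      have hdrop : cs.drop j = cs[j] :: cs.drop (j + 1) := List.drop_eq_getElem_cons hlt
      have hgd : cs.getD j ' ' = cs[j] := by simp [List.getD_eq_getElem?_getD, hlt]
      have h1 : (pvBgo (cs.drop j) (j : Int)).1 = 0 := by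
        rw [hdrop, pvBgo_cons, if_neg (hgd ▸ hv)]
      have h2 : pvRuns (cs.drop j) (j : Int) = (pvBgo (cs.drop j) (j : Int)).2 := by
        rw [pvRuns]; simp [h1]
      rw [h2]
      rw [Prod.ext_iff]
      exact ⟨by rw [h1]; omega, rfl⟩
    · have : cs.drop j = [] := List.drop_eq_nil_of_le (by omega)
      rw [this]
      simp [pvBgo, pvRuns]

-- B's outer loop folds pvTop2 over the runs of the remaining suffix, leftmost first
theorem pv_genB (cs : List Char) : ∀ (i : Nat) (b s : Option (Int × Int)),
    i ≤ cs.length →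
    pvOuter cs cs.length i b s
      = List.foldl pvTop2 (b, s) ((pvRuns (cs.drop i) (i : Int)).reverse) := by
  intro i b s
  induction i, b, s using pvOuter.induct cs cs.length with
  | case1 i b s hi hv j k hb ih =>
    intro hile
    have hge := pvInner_ge cs cs.length (i + 1)
    have hle := pvInner_le cs cs.length (i + 1) (by omega)
    have hdrop : cs.drop i = cs[i] :: cs.drop (i + 1) := List.drop_eq_getElem_cons hi
    have hgd : cs.getD i ' ' = cs[i] := by simp [List.getD_eq_getElem?_getD, hi]
    have hbgo := pvInner_bgo cs (i + 1) (by omega)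
    rw [show ((i + 1 : Nat) : Int) = (i : Int) + 1 from by push_cast; ring] at hbgo
    have hrunpos : (pvBgo (cs.drop i) (i : Int)).1 > 0 := by
      rw [hdrop, pvBgo_cons, if_pos (hgd ▸ hv), hbgo]
      dsimp only
      have := pvBgo_run_nonneg (cs.drop (pvInner cs cs.length (i + 1)))
        ((pvInner cs cs.length (i + 1) : Nat) : Int)
      omega
    have hsplit : (pvRuns (cs.drop i) (i : Int)).reverse
        = ((i : Int) - ((pvInner cs cs.length (i + 1) : Nat) : Int), (i : Int))
            :: (pvRuns (cs.drop (pvInner cs cs.length (i + 1)))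
                 ((pvInner cs cs.length (i + 1) : Nat) : Int)).reverse := by
      rw [pvRuns]
      simp only [if_pos hrunpos, List.reverse_append, List.reverse_singleton]
      rw [List.singleton_append]
      congr 1
      · rw [hdrop, pvBgo_cons, if_pos (hgd ▸ hv), hbgo]
        rw [Prod.ext_iff]
        exact ⟨by dsimp only; omega, rfl⟩
      · congr 1
        rw [hdrop, pvBgo_cons, if_pos (hgd ▸ hv), hbgo]
    rw [pvOuter, dif_pos hi, if_pos (hgd ▸ hv)]
    rw [if_pos hb]
    rw [ih (by omega), hsplit, List.foldl_cons]
    congr 1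
    have hb' : pvBetter ((i : Int) - ((pvInner cs cs.length (i + 1) : Nat) : Int), (i : Int)) b = true := hb
    simp [pvTop2, hb']
    rfl
  | case2 i b s hi hv j k hb hs2 ih =>
    intro hile
    have hge := pvInner_ge cs cs.length (i + 1)
    have hle := pvInner_le cs cs.length (i + 1) (by omega)
    have hdrop : cs.drop i = cs[i] :: cs.drop (i + 1) := List.drop_eq_getElem_cons hi
    have hgd : cs.getD i ' ' = cs[i] := by simp [List.getD_eq_getElem?_getD, hi]
    have hbgo := pvInner_bgo cs (i + 1) (by omega)
    rw [show ((i + 1 : Nat) : Int) = (i : Int) + 1 from by push_cast; ring] at hbgo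
    have hrunpos : (pvBgo (cs.drop i) (i : Int)).1 > 0 := by
      rw [hdrop, pvBgo_cons, if_pos (hgd ▸ hv), hbgo]
      dsimp only
      have := pvBgo_run_nonneg (cs.drop (pvInner cs cs.length (i + 1)))
        ((pvInner cs cs.length (i + 1) : Nat) : Int)
      omega
    have hsplit : (pvRuns (cs.drop i) (i : Int)).reverse
        = ((i : Int) - ((pvInner cs cs.length (i + 1) : Nat) : Int), (i : Int))
            :: (pvRuns (cs.drop (pvInner cs cs.length (i + 1)))
                 ((pvInner cs cs.length (i + 1) : Nat) : Int)).reverse := by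
      rw [pvRuns]
      simp only [if_pos hrunpos, List.reverse_append, List.reverse_singleton]
      rw [List.singleton_append]
      congr 1
      · rw [hdrop, pvBgo_cons, if_pos (hgd ▸ hv), hbgo]
        rw [Prod.ext_iff]
        exact ⟨by dsimp only; omega, rfl⟩
      · congr 1
        rw [hdrop, pvBgo_cons, if_pos (hgd ▸ hv), hbgo]
    rw [pvOuter, dif_pos hi, if_pos (hgd ▸ hv)]
    rw [if_neg hb, if_pos hs2]
    rw [ih (by omega), hsplit, List.foldl_cons]
    congr 1
    have hb' : ¬ pvBetter ((i : Int) - ((pvInner cs cs.length (i + 1) : Nat) : Int), (i : Int)) b = true := hb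
    have hs2' : pvBetter ((i : Int) - ((pvInner cs cs.length (i + 1) : Nat) : Int), (i : Int)) s = true := hs2
    simp [pvTop2, hb', hs2']
    rfl
  | case3 i b s hi hv j k hb hs2 ih =>
    intro hile
    have hge := pvInner_ge cs cs.length (i + 1)
    have hle := pvInner_le cs cs.length (i + 1) (by omega)
    have hdrop : cs.drop i = cs[i] :: cs.drop (i + 1) := List.drop_eq_getElem_cons hi
    have hgd : cs.getD i ' ' = cs[i] := by simp [List.getD_eq_getElem?_getD, hi]
    have hbgo := pvInner_bgo cs (i + 1) (by omega)
    rw [show ((i + 1 : Nat) : Int) = (i : Int) + 1 from by push_cast; ring] at hbgo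
    have hrunpos : (pvBgo (cs.drop i) (i : Int)).1 > 0 := by
      rw [hdrop, pvBgo_cons, if_pos (hgd ▸ hv), hbgo]
      dsimp only
      have := pvBgo_run_nonneg (cs.drop (pvInner cs cs.length (i + 1)))
        ((pvInner cs cs.length (i + 1) : Nat) : Int)
      omega
    have hsplit : (pvRuns (cs.drop i) (i : Int)).reverse
        = ((i : Int) - ((pvInner cs cs.length (i + 1) : Nat) : Int), (i : Int))
            :: (pvRuns (cs.drop (pvInner cs cs.length (i + 1)))
                 ((pvInner cs cs.length (i + 1) : Nat) : Int)).reverse := by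
      rw [pvRuns]
      simp only [if_pos hrunpos, List.reverse_append, List.reverse_singleton]
      rw [List.singleton_append]
      congr 1
      · rw [hdrop, pvBgo_cons, if_pos (hgd ▸ hv), hbgo]
        rw [Prod.ext_iff]
        exact ⟨by dsimp only; omega, rfl⟩
      · congr 1
        rw [hdrop, pvBgo_cons, if_pos (hgd ▸ hv), hbgo]
    rw [pvOuter, dif_pos hi, if_pos (hgd ▸ hv)]
    rw [if_neg hb, if_neg hs2]
    rw [ih (by omega), hsplit, List.foldl_cons]
    congr 1
    have hb' : ¬ pvBetter ((i : Int) - ((pvInner cs cs.length (i + 1) : Nat) : Int), (i : Int)) b = true := hb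
    have hs2' : ¬ pvBetter ((i : Int) - ((pvInner cs cs.length (i + 1) : Nat) : Int), (i : Int)) s = true := hs2
    simp [pvTop2, hb', hs2']
  | case4 i b s hi hv ih =>
    intro hile
    have hdrop : cs.drop i = cs[i] :: cs.drop (i + 1) := List.drop_eq_getElem_cons hi
    have hgd : cs.getD i ' ' = cs[i] := by simp [List.getD_eq_getElem?_getD, hi]
    rw [pvOuter, dif_pos hi, if_neg (hgd ▸ hv)]
    rw [ih (by omega)]
    congr 2
    have h1 : (pvBgo (cs.drop i) (i : Int)).1 = 0 := by
      rw [hdrop, pvBgo_cons, if_neg (hgd ▸ hv)]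
    have h2 : pvRuns (cs.drop i) (i : Int) = (pvBgo (cs.drop i) (i : Int)).2 := by
      rw [pvRuns]; simp [h1]
    rw [h2, hdrop, pvBgo_cons, if_neg (hgd ▸ hv)]
    dsimp only
    have hc : ((i : Int) + 1) = ((i + 1 : Nat) : Int) := by push_cast; ring
    rw [hc]
    rfl
  | case5 i b s hi =>
    intro hile
    have : i = cs.length := by omega
    subst this
    rw [pvOuter, dif_neg hi]
    simp [pvRuns, pvBgo, List.drop_length]

-- one step: the two-slot update tracks the first two elements of the sorted insertion
theorem pvTop2_insertBy (l : List (Int × Int)) (k : Int × Int) :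
    pvTop2 (pvFirst2 l) k = pvFirst2 (pvHeapPush l k) := by
  match l with
  | [] => simp [pvTop2, pvFirst2, pvHeapPush, PySem.List.insertBy, pvBetter]
  | [a] =>
    by_cases h : pvLt k a
    · simp [pvTop2, pvFirst2, pvHeapPush, PySem.List.insertBy, pvBetter, h]
    · simp [pvTop2, pvFirst2, pvHeapPush, PySem.List.insertBy, pvBetter, h]
  | a :: b :: t =>
    by_cases h1 : pvLt k a
    · simp [pvTop2, pvFirst2, pvHeapPush, PySem.List.insertBy, pvBetter, h1]
    · by_cases h2 : pvLt k b
      · simp [pvTop2, pvFirst2, pvHeapPush, PySem.List.insertBy, pvBetter, h1, h2]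
      · simp [pvTop2, pvFirst2, pvHeapPush, PySem.List.insertBy, pvBetter, h1, h2]

theorem pvTop2_fold (L : List (Int × Int)) : ∀ (l : List (Int × Int)),
    List.foldl pvTop2 (pvFirst2 l) L
      = pvFirst2 (List.foldl (fun acc x => pvHeapPush acc x) l L) := by
  induction L with
  | nil => intro l; rfl
  | cons k L' ih =>
    intro l
    rw [List.foldl_cons, List.foldl_cons, pvTop2_insertBy, ih]

-- ===== VERDICT (by name: the statement is the Claim_ definition above) =====
theorem maxVowel_spec : Claim_equal_maxVowel := by
  unfold Claim_equal_maxVowel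
  intro S _ _
  unfold Spec_maxVowel maxVowel maxVowel_alt
  simp only []
  have hA := pv_genA S.toList 0 0 (-1) [] le_rfl (fun _ => rfl)
  have hflush : pvFlush S.toList 0 0 (-1) = (pvRuns S.toList 0).reverse := by
    simp [pvFlush]
  rw [hflush] at hA
  rw [hA]
  have hB := pv_genB S.toList 0 none none (by omega)
  simp only [List.drop_zero, Nat.cast_zero] at hB
  have hfirst : ((none : Option (Int × Int)), (none : Option (Int × Int)))
      = pvFirst2 [] := rfl
  rw [hfirst, pvTop2_fold] at hB
  rw [hB]
  rcases List.foldl (fun acc x => pvHeapPush acc x) [] ((pvRuns S.toList 0).reverse)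
    with _ | ⟨⟨n1, s1⟩, t⟩
  · rfl
  · rcases t with _ | ⟨⟨n2, s2⟩, t'⟩
    · rfl
    · simp only [pvFirst2, List.head?, List.tail]
      split_ifs <;> omega
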